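-- pv_equiv track=rewrite | github.com/MDU-PHL/troika | tbrnr/utils/collate.py | calculate_resistance
-- ===== SOURCE A (Python) =====
-- def calculate_resistance(drugs_dict):
--     '''
--     based on WHO criteria for TB resistance categories
--     No drug resistance predicted = no mutations in first line drugs
--     Mono-resistance predicted =resistance in one of rif, inh, emb or pza
--     Poly-resistance predicted  = two or more resisance where both rif and inh are not included
--     Multi-drug resistance predicted = rif and inh resistance plus or minus emb and pza
--     Extensive drug-resistance predicted rif and inh AND a flouroquinolone AND one of amikacin/capreomycin/kanamycin
--     '''
--     # list of drigs in flq or ack for xdr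
--     flqlist = ['Fluoroquinolones','Levofloxacin','Moxifloxacin','Ofloxacin','Ciprofloxacin']
--     acklist = ['Amikacin', 'Capreomycin', 'Kanamycin']
--     # initialise score
--     score = 0
--     # initialise flq and ack values
--     flq = False
--     ack = False
--     # generate values for resistance call
--     for d in drugs_dict:
--         if drugs_dict[d] != 'No mutation detected':
--             if d in flqlist:
--                 flq = True
--             elif d in acklist:
--                 ack = True
--             elif d in ['Rifampicin', 'Isoniazid']:
--                 score = score + 3
--             elif d in ['Pyrazinamide', 'Ethambutol']:
--                 score = score + 1
--
--     # initialise the resistance to default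
--     resistance = 'No drug resistance predicted'
--     if score == 1 or score == 3: # one first line drug
--         resistance = 'Mono-resistance predicted'
--     elif score == 2 or score in range(4,6): # more than one first line drug where INH OR RIF can be present
--         resistance = 'Poly-resistance predicted'
--     elif score in range(6,9): # RIF and INH +/- PZA or EMB
--         if flq and ack: # there are mutations in a FLQ or amikacin,capreomycin,kanamycin
--             resistance = 'Extensive drug-resistance predicted'
--         else:
--             resistance = 'Multi-drug resistance predicted'
--
--     return resistance
-- ===== SOURCE B (Python) =====
-- NO_MUT = 'No mutation detected'
-- FLQLIST = ['Fluoroquinolones', 'Levofloxacin', 'Moxifloxacin', 'Ofloxacin', 'Ciprofloxacin']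
-- ACKLIST = ['Amikacin', 'Capreomycin', 'Kanamycin']
--
--
-- def _mutated(drugs_dict, drug):
--     return drugs_dict.get(drug, NO_MUT) != NO_MUT
--
--
-- def calculate_resistance(drugs_dict):
--     # Probe only the 13 relevant drug names instead of scanning the dict and
--     # decoding an arithmetic score: count first-line mutations directly.
--     major = sum(1 for d in ('Rifampicin', 'Isoniazid') if _mutated(drugs_dict, d))
--     minor = sum(1 for d in ('Pyrazinamide', 'Ethambutol') if _mutated(drugs_dict, d))
--     flq = any(_mutated(drugs_dict, d) for d in FLQLIST)
--     ack = any(_mutated(drugs_dict, d) for d in ACKLIST)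
--     if major == 2:
--         if flq and ack:
--             return 'Extensive drug-resistance predicted'
--         return 'Multi-drug resistance predicted'
--     if major + minor >= 2:
--         return 'Poly-resistance predicted'
--     if major + minor == 1:
--         return 'Mono-resistance predicted'
--     return 'No drug resistance predicted'
-- ===== Notes on version B (the rewrite author's own statement) =====
-- stated objective: simpler
-- what changed: B does not scan the dict or encode a score: it probes the 13 relevant drug names directly, counts first-line mutations (major/minor) and classifies by count comparisons instead of decoding score ranges.
import Mathlib
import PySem

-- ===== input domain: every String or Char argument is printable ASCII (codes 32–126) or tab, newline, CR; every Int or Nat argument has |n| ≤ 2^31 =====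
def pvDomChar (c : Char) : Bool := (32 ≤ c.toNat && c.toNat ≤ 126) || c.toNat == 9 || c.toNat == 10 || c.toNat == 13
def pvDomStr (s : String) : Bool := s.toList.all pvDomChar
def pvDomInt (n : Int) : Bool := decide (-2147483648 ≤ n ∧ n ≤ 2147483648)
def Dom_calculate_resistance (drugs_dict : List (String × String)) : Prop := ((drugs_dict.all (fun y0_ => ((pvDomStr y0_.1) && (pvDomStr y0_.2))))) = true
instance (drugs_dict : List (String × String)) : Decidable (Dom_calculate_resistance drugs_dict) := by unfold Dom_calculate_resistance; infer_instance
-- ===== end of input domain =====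

-- B is simpler: it probes the 13 relevant drug names directly and classifies by
-- explicit major/minor mutation counts instead of scanning the dict accumulating
-- an encoded score and decoding its ranges.

-- shared module constants (the literal lists of A's source; B's python repeats them)
def pvNoMut : String := "No mutation detected"
def pvFlqlist : List String := ["Fluoroquinolones", "Levofloxacin", "Moxifloxacin", "Ofloxacin", "Ciprofloxacin"]
def pvAcklist : List String := ["Amikacin", "Capreomycin", "Kanamycin"]

-- ===== PORT A =====
-- loop body of A's 'for d in drugs_dict' (state: score, flq, ack).
-- 'drugs_dict[d]' is a lookup of a key of dd, so the default of getD is never used.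
def pvAStep (dd : PySem.Dict String String) (st : Int × Bool × Bool) (d : String) : Int × Bool × Bool :=
  let (score, flq, ack) := st
  if dd.getD d pvNoMut ≠ pvNoMut then
    if d ∈ pvFlqlist then (score, true, ack)
    else if d ∈ pvAcklist then (score, flq, true)
    else if d ∈ ["Rifampicin", "Isoniazid"] then (score + 3, flq, ack)
    else if d ∈ ["Pyrazinamide", "Ethambutol"] then (score + 1, flq, ack)
    else (score, flq, ack)
  else (score, flq, ack)

def calculate_resistance (drugs_dict : List (String × String)) : String :=
  let dd := PySem.Dict.ofList drugs_dict
  let st := dd.keys.foldl (pvAStep dd) (0, false, false)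
  let score := st.1
  if score = 1 ∨ score = 3 then "Mono-resistance predicted"
  else if score = 2 ∨ (4 ≤ score ∧ score < 6) then "Poly-resistance predicted"  -- score in range(4,6)
  else if 6 ≤ score ∧ score < 9 then  -- score in range(6,9)
    (if st.2.1 && st.2.2 then "Extensive drug-resistance predicted"
     else "Multi-drug resistance predicted")
  else "No drug resistance predicted"

-- ===== PORT B =====
-- drugs_dict.get(drug, NO_MUT) != NO_MUT
def pvMutated (dd : PySem.Dict String String) (drug : String) : Bool :=
  dd.getD drug pvNoMut ≠ pvNoMut

def calculate_resistance_alt (drugs_dict : List (String × String)) : String :=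
  let dd := PySem.Dict.ofList drugs_dict
  let major := (["Rifampicin", "Isoniazid"].countP (pvMutated dd))
  let minor := (["Pyrazinamide", "Ethambutol"].countP (pvMutated dd))
  let flq := pvFlqlist.any (pvMutated dd)
  let ack := pvAcklist.any (pvMutated dd)
  if major = 2 then
    (if flq && ack then "Extensive drug-resistance predicted"
     else "Multi-drug resistance predicted")
  else if major + minor ≥ 2 then "Poly-resistance predicted"
  else if major + minor = 1 then "Mono-resistance predicted"
  else "No drug resistance predicted"

-- ===== PRECONDITION & SPEC =====
def Spec_calculate_resistance (drugs_dict : List (String × String)) (out : String) : Prop := out = calculate_resistance_alt drugs_dict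
instance (drugs_dict : List (String × String)) (out : String) : Decidable (Spec_calculate_resistance drugs_dict out) := by unfold Spec_calculate_resistance; infer_instance

-- ===== CLAIM (what is proved, stated in full; the proofs are below) =====
def Claim_equal_calculate_resistance : Prop := ∀ (drugs_dict : List (String × String)), Dom_calculate_resistance drugs_dict → Spec_calculate_resistance drugs_dict (calculate_resistance drugs_dict)

-- ===== LEMMAS AND PROOFS =====


-- loop-body predicates: which keys of the dict contribute what in A's single scan
def pFlq (dd : PySem.Dict String String) (d : String) : Bool :=
  pvMutated dd d && decide (d ∈ pvFlqlist)
def pAck (dd : PySem.Dict String String) (d : String) : Bool :=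
  pvMutated dd d && !decide (d ∈ pvFlqlist) && decide (d ∈ pvAcklist)
def pMaj (dd : PySem.Dict String String) (d : String) : Bool :=
  pvMutated dd d && !decide (d ∈ pvFlqlist) && !decide (d ∈ pvAcklist) && decide (d ∈ ["Rifampicin", "Isoniazid"])
def pMin (dd : PySem.Dict String String) (d : String) : Bool :=
  pvMutated dd d && !decide (d ∈ pvFlqlist) && !decide (d ∈ pvAcklist) && !decide (d ∈ ["Rifampicin", "Isoniazid"]) && decide (d ∈ ["Pyrazinamide", "Ethambutol"])

-- A's accumulating loop, characterised by counts and existence over the key list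
lemma foldA (dd : PySem.Dict String String) (ks : List String) : ∀ (s : Int) (f a : Bool),
    ks.foldl (pvAStep dd) (s, f, a) =
      (s + 3 * (ks.countP (pMaj dd) : Int) + (ks.countP (pMin dd) : Int),
       f || ks.any (pFlq dd), a || ks.any (pAck dd)) := by
  induction ks with
  | nil => simp
  | cons d ks ih =>
    intro s f a
    rw [List.foldl_cons]
    by_cases h0 : dd.getD d pvNoMut ≠ pvNoMut
    · by_cases h1 : d ∈ pvFlqlist
      · have hv : pvAStep dd (s, f, a) d = (s, true, a) := by simp [pvAStep, h0, h1]
        rw [hv, ih]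
        simp [List.any_cons, pMaj, pMin, pFlq, pAck, pvMutated, h0, h1]
      · by_cases h2 : d ∈ pvAcklist
        · have hv : pvAStep dd (s, f, a) d = (s, f, true) := by
            simp [pvAStep, h0, h1, h2]
          rw [hv, ih]
          simp [List.any_cons, pMaj, pMin, pFlq, pAck, pvMutated, h0, h1, h2]
        · by_cases h3 : d ∈ (["Rifampicin", "Isoniazid"] : List String)
          · have h3' : d = "Rifampicin" ∨ d = "Isoniazid" := by simpa using h3
            have hv : pvAStep dd (s, f, a) d = (s + 3, f, a) := by
              simp [pvAStep, h0, h1, h2, h3']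
            rw [hv, ih]
            simp [List.any_cons, pMaj, pMin, pFlq, pAck, pvMutated,
              h0, h1, h2, h3, Prod.ext_iff]
            push_cast; omega
          · by_cases h4 : d ∈ (["Pyrazinamide", "Ethambutol"] : List String)
            · have h3' : ¬(d = "Rifampicin" ∨ d = "Isoniazid") := by simpa using h3
              have h4' : d = "Pyrazinamide" ∨ d = "Ethambutol" := by simpa using h4
              have hv : pvAStep dd (s, f, a) d = (s + 1, f, a) := by
                simp [pvAStep, h0, h1, h2, h3', h4']
              rw [hv, ih]
              simp [List.any_cons, pMaj, pMin, pFlq, pAck, pvMutated,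
                h0, h1, h2, h3, h4, Prod.ext_iff]
              push_cast; omega
            · have h3' : ¬(d = "Rifampicin" ∨ d = "Isoniazid") := by simpa using h3
              have h4' : ¬(d = "Pyrazinamide" ∨ d = "Ethambutol") := by simpa using h4
              have hv : pvAStep dd (s, f, a) d = (s, f, a) := by
                simp [pvAStep, h0, h1, h2, h3', h4']
              rw [hv, ih]
              simp [List.any_cons, pMaj, pMin, pFlq, pAck, pvMutated,
                h0, h1, h2, h3, h4]
    · have hv : pvAStep dd (s, f, a) d = (s, f, a) := by simp [pvAStep, h0]
      rw [hv, ih]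
      simp [List.any_cons, pMaj, pMin, pFlq, pAck, pvMutated, h0]

-- a key absent from the dict reads as unmutated
lemma mutated_false_of_not_mem (dd : PySem.Dict String String) (x : String)
    (h : x ∉ dd.keys) : pvMutated dd x = false := by
  simp [pvMutated, PySem.Dict.getD_eq_get?_getD,
    (PySem.Dict.get?_eq_none_iff_not_mem_keys dd x).mpr h]

lemma countP_pair (l : List String) (q : String → Bool) (x y : String) (hxy : x ≠ y) :
    l.countP (fun d => q d && decide (d ∈ ([x, y] : List String))) =
      (if q x then l.count x else 0) + (if q y then l.count y else 0) := by
  induction l with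
  | nil => simp
  | cons d l ih =>
    simp only [List.countP_cons, List.count_cons, ih]
    by_cases h1 : d = x <;> by_cases h2 : d = y <;> by_cases hq : q d = true <;>
      simp_all <;> omega

-- count swap: counting mutated majors among the keys = probing the two major drugs
lemma countP_keys_eq (dd : PySem.Dict String String) (hnd : dd.keys.Nodup)
    (x y : String) (hxy : x ≠ y) :
    dd.keys.countP (fun d => pvMutated dd d && decide (d ∈ ([x, y] : List String))) =
      ([x, y] : List String).countP (pvMutated dd) := by
  rw [countP_pair _ _ _ _ hxy]
  have hcnt : ∀ z : String, (if pvMutated dd z then dd.keys.count z else 0)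
      = if pvMutated dd z then 1 else 0 := by
    intro z
    by_cases hz : pvMutated dd z
    · have hmem : z ∈ dd.keys := by
        by_contra hn
        rw [mutated_false_of_not_mem dd z hn] at hz; exact absurd hz (by simp)
      simp [hz, List.count_eq_one_of_mem hnd hmem]
    · simp [hz]
  rw [hcnt, hcnt]
  simp [List.countP_cons]
  by_cases hx : pvMutated dd x <;> by_cases hy : pvMutated dd y <;> simp [hx, hy]

lemma any_keys_eq (dd : PySem.Dict String String) (L : List String) :
    dd.keys.any (fun d => pvMutated dd d && decide (d ∈ L)) = L.any (pvMutated dd) := by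
  rw [Bool.eq_iff_iff]
  simp only [List.any_eq_true, Bool.and_eq_true, decide_eq_true_eq]
  constructor
  · rintro ⟨d, _, hP, hL⟩; exact ⟨d, hL, hP⟩
  · rintro ⟨d, hL, hP⟩
    refine ⟨d, ?_, hP, hL⟩
    by_contra hn
    rw [mutated_false_of_not_mem dd d hn] at hP; exact absurd hP (by simp)

lemma pMaj_eq (dd : PySem.Dict String String) (d : String) :
    pMaj dd d = (pvMutated dd d && decide (d ∈ (["Rifampicin", "Isoniazid"] : List String))) := by
  by_cases h : d ∈ (["Rifampicin", "Isoniazid"] : List String)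
  · simp only [List.mem_cons, List.not_mem_nil, or_false] at h
    rcases h with h | h <;> subst h <;> simp [pMaj, pvFlqlist, pvAcklist]
  · simp [pMaj, h]

lemma pMin_eq (dd : PySem.Dict String String) (d : String) :
    pMin dd d = (pvMutated dd d && decide (d ∈ (["Pyrazinamide", "Ethambutol"] : List String))) := by
  by_cases h : d ∈ (["Pyrazinamide", "Ethambutol"] : List String)
  · simp only [List.mem_cons, List.not_mem_nil, or_false] at h
    rcases h with h | h <;> subst h <;> simp [pMin, pvFlqlist, pvAcklist]
  · simp [pMin, h]

lemma pAck_eq (dd : PySem.Dict String String) (d : String) :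
    pAck dd d = (pvMutated dd d && decide (d ∈ pvAcklist)) := by
  by_cases h : d ∈ pvAcklist
  · simp only [pvAcklist, List.mem_cons, List.not_mem_nil, or_false] at h
    rcases h with h | h | h <;> subst h <;> simp [pAck, pvFlqlist, pvAcklist]
  · simp [pAck, h]

-- ===== VERDICT (by name: the statement is the Claim_ definition above) =====
theorem calculate_resistance_spec : Claim_equal_calculate_resistance := by
  intro l _
  show calculate_resistance l = calculate_resistance_alt l
  simp only [calculate_resistance, calculate_resistance_alt]
  have hnd : (PySem.Dict.ofList l).keys.Nodup := PySem.Dict.nodup_keys_ofList l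
  set dd := PySem.Dict.ofList l with hdd
  rw [foldA]
  simp only [Bool.false_or]
  rw [funext (pMaj_eq dd), funext (pMin_eq dd), funext (pAck_eq dd)]
  rw [countP_keys_eq dd hnd _ _ (by decide), countP_keys_eq dd hnd _ _ (by decide)]
  have hflq : dd.keys.any (pFlq dd) = pvFlqlist.any (pvMutated dd) := by
    unfold pFlq; exact any_keys_eq dd pvFlqlist
  rw [hflq, any_keys_eq dd pvAcklist]
  have hm : (["Rifampicin", "Isoniazid"] : List String).countP (pvMutated dd) ≤ 2 :=
    le_trans List.countP_le_length (by decide)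
  have hn : (["Pyrazinamide", "Ethambutol"] : List String).countP (pvMutated dd) ≤ 2 :=
    le_trans List.countP_le_length (by decide)
  generalize (["Rifampicin", "Isoniazid"] : List String).countP (pvMutated dd) = m at hm ⊢
  generalize (["Pyrazinamide", "Ethambutol"] : List String).countP (pvMutated dd) = n at hn ⊢
  interval_cases m <;> interval_cases n <;> norm_num
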